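-- pv_equiv track=rewrite | github.com/Eunsol-Lee/codejam | codejam-2020/2020 QR 5 Indicium.py | findTrace
-- ===== SOURCE A (Python) =====
-- def findTrace(N, K, trace):
--     if (N == 2 or N == 3) and K % N != 0:
--         return "IMPOSSIBLE"
--     if K % N == 0:
--         for _ in range(N):
--             trace.append(K // N)
--         return "POSSIBLE"
--
--     for x in range(1, N + 1):
--         for y in range(x, N + 1):
--             if (K - x - y) % (N - 2) == 0:
--                 z = (K - x - y) // (N - 2)
--                 if z != x and z != y and z >= 1 and z <= N:
--                     for _ in range(N - 2):
--                         trace.append(z)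
--                     trace.append(x)
--                     trace.append(y)
--                     return "POSSIBLE"
--     return "IMPOSSIBLE"
-- ===== SOURCE B (Python) =====
-- def findTrace(N, K, trace):
--     # Same return value and same trace mutation as A; inner scan replaced by
--     # jumping directly through the residue class y === K-x (mod N-2).
--     if (N == 2 or N == 3) and K % N != 0:
--         return "IMPOSSIBLE"
--     if K % N == 0:
--         trace.extend([K // N] * N)
--         return "POSSIBLE"
--     m = N - 2
--     for x in range(1, N + 1):
--         y = x + (K - 2 * x) % m
--         while y <= N:
--             z = (K - x - y) // m
--             if z != x and z != y and 1 <= z <= N: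
--                 trace.extend([z] * m)
--                 trace.append(x)
--                 trace.append(y)
--                 return "POSSIBLE"
--             y += m
--     return "IMPOSSIBLE"
-- ===== Notes on version B (the rewrite author's own statement) =====
-- stated objective: faster
-- what changed: A's inner brute-force scan over every y in [x,N] is replaced by jumping directly through the arithmetic progression of y with (K-x-y) divisible by N-2, giving O(1) candidates per x instead of O(N).
import Mathlib
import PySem

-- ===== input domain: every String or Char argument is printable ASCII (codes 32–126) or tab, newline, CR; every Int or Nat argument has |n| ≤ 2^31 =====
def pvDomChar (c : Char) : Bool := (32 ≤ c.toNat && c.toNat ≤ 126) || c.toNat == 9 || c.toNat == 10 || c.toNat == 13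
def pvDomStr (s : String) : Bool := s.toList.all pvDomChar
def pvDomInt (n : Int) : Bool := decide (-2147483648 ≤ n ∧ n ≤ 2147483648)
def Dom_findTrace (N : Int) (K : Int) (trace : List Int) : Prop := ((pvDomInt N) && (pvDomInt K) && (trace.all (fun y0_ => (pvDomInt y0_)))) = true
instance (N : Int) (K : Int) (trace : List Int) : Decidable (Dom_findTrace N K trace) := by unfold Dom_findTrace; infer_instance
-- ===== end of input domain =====

-- B replaces A's inner brute-force scan over every y in [x,N] by stepping only
-- through the residue class y ≡ K-x (mod N-2) (objective: faster).  Both Pythons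
-- mutate `trace` identically; the equivalence proved here is about the return value.

-- ===== PORT A =====
def pvACheck (N K x y : Int) : Bool :=
  if PySem.Int.mod (K - x - y) (N - 2) = 0 then
    let z := PySem.Int.floordiv (K - x - y) (N - 2)
    (z != x) && (z != y) && decide (1 ≤ z) && decide (z ≤ N)
  else false

def findTrace (N : Int) (K : Int) (trace : List Int) : String :=
  if (N = 2 ∨ N = 3) ∧ PySem.Int.mod K N ≠ 0 then "IMPOSSIBLE"
  else if PySem.Int.mod K N = 0 then "POSSIBLE"
  else if (PySem.List.pyRange 1 (N + 1) 1).any (fun x =>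
      (PySem.List.pyRange x (N + 1) 1).any (fun y => pvACheck N K x y))
    then "POSSIBLE" else "IMPOSSIBLE"

-- ===== PORT B =====
def pvBCheck (N K x m y : Int) : Bool :=
  let z := PySem.Int.floordiv (K - x - y) m
  (z != x) && (z != y) && decide (1 ≤ z) && decide (z ≤ N)

-- the `while y <= N: … y += m` loop; fuel bounds the number of steps (m ≥ 1 whenever reached)
def pvBWhile (N K x m : Int) : Int → Nat → Bool
  | _, 0 => false
  | y, fuel + 1 =>
    if y ≤ N then
      if pvBCheck N K x m y then true else pvBWhile N K x m (y + m) fuel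
    else false

def findTrace_alt (N : Int) (K : Int) (trace : List Int) : String :=
  if (N = 2 ∨ N = 3) ∧ PySem.Int.mod K N ≠ 0 then "IMPOSSIBLE"
  else if PySem.Int.mod K N = 0 then "POSSIBLE"
  else
    let m := N - 2
    if (PySem.List.pyRange 1 (N + 1) 1).any (fun x =>
        let y0 := x + PySem.Int.mod (K - 2 * x) m
        pvBWhile N K x m y0 (N + 1 - y0).toNat)
      then "POSSIBLE" else "IMPOSSIBLE"

-- ===== PRECONDITION & SPEC =====
-- Pre_ excludes only N = 0, where Python's K % N raises ZeroDivisionError.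
def Pre_findTrace (N : Int) (K : Int) (trace : List Int) : Prop := N ≠ 0
instance (N : Int) (K : Int) (trace : List Int) : Decidable (Pre_findTrace N K trace) := by unfold Pre_findTrace; infer_instance
def pvWitness_findTrace : Int × Int × List Int := (4, 17, [])

def Spec_findTrace (N : Int) (K : Int) (trace : List Int) (out : String) : Prop := out = findTrace_alt N K trace
instance (N : Int) (K : Int) (trace : List Int) (out : String) : Decidable (Spec_findTrace N K trace out) := by unfold Spec_findTrace; infer_instance

-- ===== CLAIM (what is proved, stated in full; the proofs are below) =====
def Claim_equal_findTrace : Prop := ∀ (N : Int) (K : Int) (trace : List Int), Dom_findTrace N K trace → Pre_findTrace N K trace → Spec_findTrace N K trace (findTrace N K trace)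

-- ===== LEMMAS AND PROOFS =====

-- the shared z-test, as a proposition
def pvQ (N K x y : Int) : Prop :=
  PySem.Int.floordiv (K - x - y) (N - 2) ≠ x ∧
  PySem.Int.floordiv (K - x - y) (N - 2) ≠ y ∧
  1 ≤ PySem.Int.floordiv (K - x - y) (N - 2) ∧
  PySem.Int.floordiv (K - x - y) (N - 2) ≤ N

lemma pvACheck_iff (N K x y : Int) :
    pvACheck N K x y = true ↔ (N - 2) ∣ (K - x - y) ∧ pvQ N K x y := by
  simp only [pvACheck, pvQ]
  split_ifs with h
  · simp [PySem.Int.mod_eq_zero_iff_dvd] at h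
    simp [h, and_assoc]
  · simp [PySem.Int.mod_eq_zero_iff_dvd] at h
    simp [h]

lemma pvBCheck_iff (N K x y : Int) :
    pvBCheck N K x (N - 2) y = true ↔ pvQ N K x y := by
  simp [pvBCheck, pvQ, and_assoc]

lemma pvBWhile_iff (N K x m : Int) (hm : 0 < m) :
    ∀ (fuel : Nat) (y : Int), N + 1 - y ≤ (fuel : Int) →
      (pvBWhile N K x m y fuel = true ↔
        ∃ k : Nat, y + (k : Int) * m ≤ N ∧ pvBCheck N K x m (y + (k : Int) * m) = true) := by
  intro fuel
  induction fuel with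
  | zero =>
    intro y hf
    simp only [pvBWhile]
    constructor
    · intro h; exact absurd h (by simp)
    · rintro ⟨k, hk, -⟩
      have hkm : 0 ≤ (k : Int) * m := mul_nonneg (by positivity) hm.le
      push_cast at hf
      omega
  | succ fuel ih =>
    intro y hf
    simp only [pvBWhile]
    split_ifs with hy hc
    · constructor
      · intro _; exact ⟨0, by simpa using hy, by simpa using hc⟩
      · intro _; rfl
    · have hf' : N + 1 - (y + m) ≤ (fuel : Int) := by push_cast at hf ⊢; omega
      rw [ih (y + m) hf']
      constructor
      · rintro ⟨k, hk, hck⟩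
        have e : y + ((k : Int) + 1) * m = y + m + (k : Int) * m := by ring
        exact ⟨k + 1, by push_cast; rw [e]; exact hk, by push_cast; rw [e]; exact hck⟩
      · rintro ⟨k, hk, hck⟩
        cases k with
        | zero => simp at hk hck; exact absurd hck (by simpa using hc)
        | succ k =>
          have e : y + ((k : Int) + 1) * m = y + m + (k : Int) * m := by ring
          push_cast at hk hck
          rw [e] at hk hck
          exact ⟨k, hk, hck⟩
    · constructor
      · intro h; exact absurd h (by simp)
      · rintro ⟨k, hk, -⟩
        have hkm : 0 ≤ (k : Int) * m := mul_nonneg (by positivity) hm.le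
        omega

-- divisibility of K - x - y0 for the starting point y0 of B's inner loop
lemma pvY0_dvd (K x m : Int) :
    m ∣ (K - x - (x + PySem.Int.mod (K - 2 * x) m)) := by
  refine ⟨PySem.Int.floordiv (K - 2 * x) m, ?_⟩
  have h := PySem.Int.floordiv_mul_add_mod (K - 2 * x) m
  linarith [h]

-- per-x: A's scan over all y in [x, N] finds a hit iff B's residue-class walk does
lemma pvInner_eq (N K x : Int) (h3 : 3 ≤ N) (hx1 : 1 ≤ x) :
    ((PySem.List.pyRange x (N + 1) 1).any (fun y => pvACheck N K x y))
      = (pvBWhile N K x (N - 2) (x + PySem.Int.mod (K - 2 * x) (N - 2))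
          (N + 1 - (x + PySem.Int.mod (K - 2 * x) (N - 2))).toNat) := by
  set m : Int := N - 2 with hmdef
  have hm : 0 < m := by omega
  set y0 : Int := x + PySem.Int.mod (K - 2 * x) m with hy0def
  have hy0x : x ≤ y0 := by
    have := PySem.Int.mod_nonneg (K - 2 * x) hm; omega
  have hy0lt : y0 < x + m := by
    have := PySem.Int.mod_lt (K - 2 * x) hm; omega
  have hdy0 : m ∣ (K - x - y0) := pvY0_dvd K x m
  have hfuel : N + 1 - y0 ≤ ((N + 1 - y0).toNat : Int) := Int.self_le_toNat _
  rw [Bool.eq_iff_iff, List.any_eq_true, pvBWhile_iff N K x m hm _ y0 hfuel]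
  constructor
  · rintro ⟨y, hmem, hch⟩
    rw [PySem.List.mem_pyRange_one] at hmem
    rw [pvACheck_iff] at hch
    obtain ⟨hdvd, hQ⟩ := hch
    have hdy : m ∣ (y - y0) := by
      have := dvd_sub hdy0 hdvd
      simpa [sub_sub_sub_cancel_left] using this
    obtain ⟨t, ht⟩ := hdy
    have ht0 : 0 ≤ t := by nlinarith [hmem.1, hy0lt]
    refine ⟨t.toNat, ?_, ?_⟩
    · rw [Int.toNat_of_nonneg ht0, mul_comm]; omega
    · rw [Int.toNat_of_nonneg ht0, mul_comm, ← ht]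
      have : y0 + (y - y0) = y := by ring
      rw [this, pvBCheck_iff]; exact hQ
  · rintro ⟨k, hk, hck⟩
    refine ⟨y0 + (k : Int) * m, ?_, ?_⟩
    · rw [PySem.List.mem_pyRange_one]
      have hkm : 0 ≤ (k : Int) * m := mul_nonneg (by positivity) hm.le
      omega
    · rw [pvACheck_iff]
      rw [pvBCheck_iff] at hck
      refine ⟨?_, hck⟩
      have : K - x - (y0 + (k : Int) * m) = (K - x - y0) - (k : Int) * m := by ring
      rw [this]
      exact dvd_sub hdy0 (dvd_mul_left m _)

-- ===== VERDICT (by name: the statement is the Claim_ definition above) =====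
theorem findTrace_spec : Claim_equal_findTrace := by
  intro N K trace _ hpre
  unfold Spec_findTrace findTrace findTrace_alt
  by_cases h1 : (N = 2 ∨ N = 3) ∧ PySem.Int.mod K N ≠ 0
  · rw [if_pos h1, if_pos h1]
  rw [if_neg h1, if_neg h1]
  by_cases h2 : PySem.Int.mod K N = 0
  · rw [if_pos h2, if_pos h2]
  rw [if_neg h2, if_neg h2]
  -- the search branch: whenever an x exists, N ∉ {0,1,2}, so N ≥ 3 and N-2 ≥ 1
  have hAny : ((PySem.List.pyRange 1 (N + 1) 1).any fun x =>
        (PySem.List.pyRange x (N + 1) 1).any fun y => pvACheck N K x y)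
      = ((PySem.List.pyRange 1 (N + 1) 1).any fun x =>
          pvBWhile N K x (N - 2) (x + PySem.Int.mod (K - 2 * x) (N - 2))
            (N + 1 - (x + PySem.Int.mod (K - 2 * x) (N - 2))).toNat) := by
    rw [Bool.eq_iff_iff, List.any_eq_true, List.any_eq_true]
    constructor <;>
    · rintro ⟨x, hmem, hx⟩
      refine ⟨x, hmem, ?_⟩
      have hxb := PySem.List.mem_pyRange_one.mp hmem
      have h3 : 3 ≤ N := by
        have hN1 : 1 ≤ N := by omega
        by_contra hlt
        have hN3 : N < 3 := by omega
        interval_cases N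
        · exact h2 (by rw [PySem.Int.mod_eq_zero_iff_dvd]; exact one_dvd _)
        · exact h1 ⟨Or.inl rfl, h2⟩
      first
        | (rw [← pvInner_eq N K x h3 hxb.1]; exact hx)
        | (rw [pvInner_eq N K x h3 hxb.1]; exact hx)
  rw [hAny]
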